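-- pv_equiv track=rewrite | github.com/GrigoryEvko/onediff | onediff_diffusers_extensions/onediffx/lora/safetensors_utils.py | detect_lora_format_from_keys
-- ===== SOURCE A (Python) =====
-- from typing import Dict, Tuple, Union, Optional, List, Awaitable
--
-- def detect_lora_format_from_keys(keys: List[str]) -> str:
--     """
--     Detect LoRA format from key names without loading tensors.
--
--     Args:
--         keys: List of state dict keys
--
--     Returns:
--         Format string: 'kohya', 'peft', 'diffusers_old', 'diffusers', 'unknown'
--     """
--     # Check for Kohya format
--     kohya_prefixes = ("lora_unet_", "lora_te_", "lora_te1_", "lora_te2_")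
--     kohya_suffixes = (".lora_down.weight", ".lora_up.weight", ".alpha")
--     if any(k.startswith(kohya_prefixes) and k.endswith(kohya_suffixes) for k in keys):
--         return "kohya"
--
--     # Check for old diffusers format
--     if any("to_out_lora" in k for k in keys):
--         return "diffusers_old"
--
--     # Check for PEFT format
--     if any(".lora_A" in k and ".weight" in k for k in keys):
--         return "peft"
--
--     # Check for new diffusers format
--     if any("lora_linear_layer" in k for k in keys):
--         return "diffusers"
--
--     return "unknown"
-- ===== SOURCE B (Python) =====
-- def detect_lora_format_from_keys(keys):
--     """Single pass over keys maintaining four flags, then return by precedence."""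
--     found_kohya = found_diffusers_old = found_peft = found_diffusers = False
--     kohya_prefixes = ("lora_unet_", "lora_te_", "lora_te1_", "lora_te2_")
--     kohya_suffixes = (".lora_down.weight", ".lora_up.weight", ".alpha")
--     for k in keys:
--         found_kohya = found_kohya or (k.startswith(kohya_prefixes) and k.endswith(kohya_suffixes))
--         found_diffusers_old = found_diffusers_old or ("to_out_lora" in k)
--         found_peft = found_peft or (".lora_A" in k and ".weight" in k)
--         found_diffusers = found_diffusers or ("lora_linear_layer" in k)
--     if found_kohya:
--         return "kohya"
--     if found_diffusers_old:
--         return "diffusers_old"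
--     if found_peft:
--         return "peft"
--     if found_diffusers:
--         return "diffusers"
--     return "unknown"
-- ===== Notes on version B (the rewrite author's own statement) =====
-- stated objective: alternative
-- what changed: Replaces A's four sequential any(...) scans over the key list by one fold that maintains four boolean flags and applies the same precedence after the single pass.
import Mathlib
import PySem

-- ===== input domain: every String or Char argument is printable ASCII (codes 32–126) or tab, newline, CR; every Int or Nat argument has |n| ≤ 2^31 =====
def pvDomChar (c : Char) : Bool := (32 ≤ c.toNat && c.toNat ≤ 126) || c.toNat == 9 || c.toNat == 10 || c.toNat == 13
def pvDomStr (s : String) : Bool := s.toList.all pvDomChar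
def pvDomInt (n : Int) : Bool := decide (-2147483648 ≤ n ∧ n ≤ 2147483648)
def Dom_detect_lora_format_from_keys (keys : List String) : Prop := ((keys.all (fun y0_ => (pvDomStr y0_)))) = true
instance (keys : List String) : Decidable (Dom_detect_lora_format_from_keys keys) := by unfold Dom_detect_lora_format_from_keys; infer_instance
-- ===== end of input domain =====

-- B replaces A's four sequential any(...) scans with one fold over the keys maintaining four boolean flags (alternative decomposition, same cost).


-- ===== PORT A =====
-- k.startswith(kohya_prefixes): Python tuple-startswith = or over the prefixes (exact)
def pvKohyaTest (k : String) : Bool :=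
  (PySem.Str.startswith k "lora_unet_" || PySem.Str.startswith k "lora_te_" ||
   PySem.Str.startswith k "lora_te1_" || PySem.Str.startswith k "lora_te2_") &&
  (PySem.Str.endswith k ".lora_down.weight" || PySem.Str.endswith k ".lora_up.weight" ||
   PySem.Str.endswith k ".alpha")

def pvPeftTest (k : String) : Bool :=
  PySem.Str.isIn ".lora_A" k && PySem.Str.isIn ".weight" k

def detect_lora_format_from_keys (keys : List String) : String :=
  if keys.any (fun k => pvKohyaTest k) then "kohya"
  else if keys.any (fun k => PySem.Str.isIn "to_out_lora" k) then "diffusers_old"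
  else if keys.any (fun k => pvPeftTest k) then "peft"
  else if keys.any (fun k => PySem.Str.isIn "lora_linear_layer" k) then "diffusers"
  else "unknown"

-- ===== PORT B =====
-- single pass: fold maintaining four flags (kohya, diffusers_old, peft, diffusers)
def detect_lora_format_from_keys_alt (keys : List String) : String :=
  let flags := keys.foldl
    (fun (acc : Bool × Bool × Bool × Bool) k =>
      (acc.1 || pvKohyaTest k,
       acc.2.1 || PySem.Str.isIn "to_out_lora" k,
       acc.2.2.1 || pvPeftTest k,
       acc.2.2.2 || PySem.Str.isIn "lora_linear_layer" k))
    (false, false, false, false)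
  if flags.1 then "kohya"
  else if flags.2.1 then "diffusers_old"
  else if flags.2.2.1 then "peft"
  else if flags.2.2.2 then "diffusers"
  else "unknown"

-- ===== PRECONDITION & SPEC =====
def Spec_detect_lora_format_from_keys (keys : List String) (out : String) : Prop := out = detect_lora_format_from_keys_alt keys
instance (keys : List String) (out : String) : Decidable (Spec_detect_lora_format_from_keys keys out) := by unfold Spec_detect_lora_format_from_keys; infer_instance

-- ===== CLAIM (what is proved, stated in full; the proofs are below) =====
def Claim_equal_detect_lora_format_from_keys : Prop := ∀ (keys : List String), Dom_detect_lora_format_from_keys keys → Spec_detect_lora_format_from_keys keys (detect_lora_format_from_keys keys)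

-- ===== LEMMAS AND PROOFS =====
-- the fold computes exactly the four 'any' scans (stated for arbitrary per-key tests)
theorem pvFoldFlags (p q r s : String → Bool) (keys : List String) (a b c d : Bool) :
    keys.foldl
      (fun (acc : Bool × Bool × Bool × Bool) k =>
        (acc.1 || p k, acc.2.1 || q k, acc.2.2.1 || r k, acc.2.2.2 || s k))
      (a, b, c, d)
    = (a || keys.any p, b || keys.any q, c || keys.any r, d || keys.any s) := by
  induction keys generalizing a b c d with
  | nil => simp
  | cons x xs ih =>
    rw [List.foldl_cons, ih]
    simp [Bool.or_assoc]

-- ===== VERDICT (by name: the statement is the Claim_ definition above) =====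
theorem detect_lora_format_from_keys_spec : Claim_equal_detect_lora_format_from_keys := by
  intro keys _
  unfold Spec_detect_lora_format_from_keys detect_lora_format_from_keys detect_lora_format_from_keys_alt
  rw [pvFoldFlags]
  simp
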